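-- pv_equiv track=rewrite | github.com/Idivanchik/UNO | main.py | check_many_cards
-- ===== SOURCE A (Python) =====
-- def check_many_cards(cards, top):
--     if len(cards) == 0:
--         return True
--     elif len(cards) == 1 and cards[0][0] == top[0]:
--         return True
--     elif len(cards) > 1 and cards[0][0] == top[0]:
--         top = cards.pop(0)
--         return check_many_cards(cards, top)
--     else:
--         return False
-- ===== SOURCE B (Python) =====
-- def check_many_cards(cards, top):
--     # Iterative version of A: pop matching front cards (same mutation as A's
--     # recursion with cards.pop(0)), then decide on what is left.
--     while len(cards) > 1 and cards[0][0] == top[0]: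
--         top = cards.pop(0)
--     if len(cards) == 0:
--         return True
--     if len(cards) == 1 and cards[0][0] == top[0]:
--         return True
--     return False
-- ===== Notes on version B (the rewrite author's own statement) =====
-- stated objective: simpler
-- what changed: Replaces A's self-recursion with an explicit while loop that pops matching front cards and then decides on the remainder, preserving A's in-place mutation of cards.
import Mathlib
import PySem

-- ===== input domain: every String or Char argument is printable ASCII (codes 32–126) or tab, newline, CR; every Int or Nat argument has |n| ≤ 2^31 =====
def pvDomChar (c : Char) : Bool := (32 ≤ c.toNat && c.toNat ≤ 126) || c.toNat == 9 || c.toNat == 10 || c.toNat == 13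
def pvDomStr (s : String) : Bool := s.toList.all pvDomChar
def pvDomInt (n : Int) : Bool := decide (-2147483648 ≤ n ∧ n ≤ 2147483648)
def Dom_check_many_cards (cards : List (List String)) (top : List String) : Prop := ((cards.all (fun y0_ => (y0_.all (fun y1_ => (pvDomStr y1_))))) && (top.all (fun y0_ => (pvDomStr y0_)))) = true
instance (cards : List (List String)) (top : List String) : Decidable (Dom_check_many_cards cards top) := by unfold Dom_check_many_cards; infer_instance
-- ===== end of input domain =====

-- B replaces A's self-recursion with an explicit while loop (popping matching
-- front cards, then deciding on the remainder); same in-place mutation of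
-- `cards` as A, equivalence proved about the return value.

-- ===== PORT A =====
-- `l[0]` with a default: Pre_ excludes the inputs where Python would raise IndexError here.
def pvHd (l : List String) : String := l.head?.getD ""

def check_many_cards (cards : List (List String)) (top : List String) : Bool :=
  match cards with
  | [] => true
  | c :: rest =>
    if rest = [] ∧ pvHd c = pvHd top then true
    else if rest ≠ [] ∧ pvHd c = pvHd top then check_many_cards rest c
    else false

-- ===== PORT B =====
-- the while loop: state (cards, top); pop the front card into top while
-- len(cards) > 1 and the first elements match
def pvAltLoop (cards : List (List String)) (top : List String) :
    List (List String) × List String :=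
  match cards with
  | c :: c2 :: rest =>
    if pvHd c = pvHd top then pvAltLoop (c2 :: rest) c else (cards, top)
  | _ => (cards, top)

def check_many_cards_alt (cards : List (List String)) (top : List String) : Bool :=
  let st := pvAltLoop cards top
  if st.1 = [] then true
  else if st.1.length = 1 ∧ pvHd (st.1.head?.getD []) = pvHd st.2 then true
  else false

-- ===== PRECONDITION & SPEC =====
-- Pre_ excludes exactly the inputs where Python A raises IndexError: a nonempty
-- cards with empty top, or an empty card whose predecessors all match top's head.
def Pre_check_many_cards (cards : List (List String)) (top : List String) : Prop :=
  cards = [] ∨ (top ≠ [] ∧ ∀ i : Fin cards.length, cards[i] = [] →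
    ∃ j : Fin cards.length, j.1 < i.1 ∧ (cards[j]).head? ≠ top.head?)
instance (cards : List (List String)) (top : List String) : Decidable (Pre_check_many_cards cards top) := by unfold Pre_check_many_cards; infer_instance

def pvWitness_check_many_cards : List (List String) × List String :=
  ([["r", "1"], ["r", "7"]], ["r", "2"])

def Spec_check_many_cards (cards : List (List String)) (top : List String) (out : Bool) : Prop := out = check_many_cards_alt cards top
instance (cards : List (List String)) (top : List String) (out : Bool) : Decidable (Spec_check_many_cards cards top out) := by unfold Spec_check_many_cards; infer_instance

-- ===== CLAIM (what is proved, stated in full; the proofs are below) =====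
def Claim_equal_check_many_cards : Prop := ∀ (cards : List (List String)) (top : List String), Dom_check_many_cards cards top → Pre_check_many_cards cards top → Spec_check_many_cards cards top (check_many_cards cards top)

-- ===== LEMMAS AND PROOFS =====
-- The two ports agree on ALL inputs (the precondition is only there to fence
-- off the inputs where the Python programs raise).
theorem check_eq_alt (cards : List (List String)) (top : List String) :
    check_many_cards cards top = check_many_cards_alt cards top := by
  induction cards generalizing top with
  | nil => rfl
  | cons c rest ih =>
    match rest with
    | [] =>
      by_cases h : pvHd c = pvHd top <;>
        simp [check_many_cards, check_many_cards_alt, pvAltLoop, h]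
    | c2 :: rest' =>
      by_cases h : pvHd c = pvHd top
      · have := ih (top := c)
        simp [check_many_cards, check_many_cards_alt, pvAltLoop, h] at this ⊢
        exact this
      · simp [check_many_cards, check_many_cards_alt, pvAltLoop, h]

-- ===== VERDICT (by name: the statement is the Claim_ definition above) =====
theorem check_many_cards_spec : Claim_equal_check_many_cards := by
  intro cards top _ _
  exact check_eq_alt cards top
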